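-- pv_equiv track=rewrite | github.com/tlgus626/CodingTest_Study | SonDonghyun/0921_Study/programmers_level2_2^n-배열-자르기.py | solution
-- ===== SOURCE A (Python) =====
-- def solution(n, left, right):
--     m1, n1 = divmod(left, n)
--     m2, n2 = divmod(right, n)
--     if m1 != m2:
--         arr = [j + 1 if i <= j else i + 1 for j in range(m1 + 1, m2) for i in range(n)]
--         left_arr = [m1 + 1 if i <= m1 else i + 1 for i in range(n) if i >= n1]
--         right_arr = [m2 + 1 if i <= m2 else i + 1 for i in range(n) if i <= n2]
--         result = left_arr + arr + right_arr
--     else: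
--         result = [m1 + 1 if i <= m1 else i + 1 for i in range(n) if i >= n1 and i <= n2]
--
--     return result
-- ===== SOURCE B (Python) =====
-- def solution(n, left, right):
--     # one flat pass: cell value at flat index i is max(row, col) + 1
--     return [max(i // n, i % n) + 1 for i in range(left, right + 1)]
-- ===== Notes on version B (the rewrite author's own statement) =====
-- stated objective: simpler
-- what changed: Replaces A's divmod-based three-segment case split (left partial row + full middle rows + right partial row, concatenated) with a single flat pass over range(left, right+1) using the closed-form cell value max(i//n, i%n)+1.
-- outside the precondition, e.g. on solution(-2, 0, 3): A returns [], B returns [1, 0, 1, 0]; on solution(3, 5, 2): A returns [3, 1, 2, 3], B returns []; on solution(0, 1, 2): A raises ZeroDivisionError, B raises ZeroDivisionError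
import Mathlib
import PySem

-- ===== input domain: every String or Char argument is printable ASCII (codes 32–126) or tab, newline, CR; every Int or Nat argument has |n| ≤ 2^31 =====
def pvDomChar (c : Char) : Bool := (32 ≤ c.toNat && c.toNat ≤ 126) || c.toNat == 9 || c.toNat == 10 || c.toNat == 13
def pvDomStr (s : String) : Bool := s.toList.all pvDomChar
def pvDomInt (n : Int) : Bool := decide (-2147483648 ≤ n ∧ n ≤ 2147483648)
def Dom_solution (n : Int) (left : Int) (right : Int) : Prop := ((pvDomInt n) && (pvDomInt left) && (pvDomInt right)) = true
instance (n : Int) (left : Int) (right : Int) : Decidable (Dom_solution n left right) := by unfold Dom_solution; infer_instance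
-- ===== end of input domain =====

-- B replaces A's three-segment case split with one flat pass computing max(i//n, i%n)+1; objective: simpler.

-- ===== PORT A =====
def solution (n : Int) (left : Int) (right : Int) : List Int :=
  let m1 := PySem.Int.floordiv left n
  let n1 := PySem.Int.mod left n
  let m2 := PySem.Int.floordiv right n
  let n2 := PySem.Int.mod right n
  if m1 ≠ m2 then
    let arr := (PySem.List.pyRange (m1 + 1) m2 1).flatMap
      (fun j => (PySem.List.pyRange 0 n 1).map (fun i => if i ≤ j then j + 1 else i + 1))
    let left_arr := ((PySem.List.pyRange 0 n 1).filter (fun i => decide (n1 ≤ i))).map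
      (fun i => if i ≤ m1 then m1 + 1 else i + 1)
    let right_arr := ((PySem.List.pyRange 0 n 1).filter (fun i => decide (i ≤ n2))).map
      (fun i => if i ≤ m2 then m2 + 1 else i + 1)
    left_arr ++ arr ++ right_arr
  else
    ((PySem.List.pyRange 0 n 1).filter (fun i => decide (n1 ≤ i) && decide (i ≤ n2))).map
      (fun i => if i ≤ m1 then m1 + 1 else i + 1)

-- ===== PORT B =====
def solution_alt (n : Int) (left : Int) (right : Int) : List Int :=
  (PySem.List.pyRange left (right + 1) 1).map
    (fun i => max (PySem.Int.floordiv i n) (PySem.Int.mod i n) + 1)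

-- ===== PRECONDITION & SPEC =====
-- Pre_ excludes n = 0, where A raises ZeroDivisionError; n < 0 with left ≤ right, outside the
-- task's natural domain (a 2^n array needs n ≥ 1), where A returns [] only because range(n) is
-- empty; and reversed ranges left > right whose endpoints fall in different rows — outside the
-- problem's contract left ≤ right — where A returns leftover partial-row segments while B
-- returns the empty list.
def Pre_solution (n : Int) (left : Int) (right : Int) : Prop :=
  n ≠ 0 ∧ (1 ≤ n ∨ right < left) ∧
    (1 ≤ n → (left ≤ right ∨ PySem.Int.floordiv left n = PySem.Int.floordiv right n))
instance (n : Int) (left : Int) (right : Int) : Decidable (Pre_solution n left right) := by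
  unfold Pre_solution; infer_instance

def pvWitness_solution : Int × Int × Int := (4, 7, 14)

def Spec_solution (n : Int) (left : Int) (right : Int) (out : List Int) : Prop := out = solution_alt n left right
instance (n : Int) (left : Int) (right : Int) (out : List Int) : Decidable (Spec_solution n left right out) := by unfold Spec_solution; infer_instance

-- ===== CLAIM (what is proved, stated in full; the proofs are below) =====
def Claim_equal_solution : Prop := ∀ (n : Int) (left : Int) (right : Int), Dom_solution n left right → Pre_solution n left right → Spec_solution n left right (solution n left right)

-- ===== LEMMAS AND PROOFS =====

-- one row of B's flat pass is A's per-row comprehension, shifted by m*n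
lemma pv_row (n m a b : Int) (hn : 0 < n) (ha : 0 ≤ a) (hb : b ≤ n) :
    (PySem.List.pyRange (m * n + a) (m * n + b) 1).map
        (fun i => max (PySem.Int.floordiv i n) (PySem.Int.mod i n) + 1)
      = (PySem.List.pyRange a b 1).map (fun i => if i ≤ m then m + 1 else i + 1) := by
  rw [PySem.List.pyRange_one, PySem.List.pyRange_one]
  have h : (m * n + b - (m * n + a)).toNat = (b - a).toNat := by omega
  rw [h, List.map_map, List.map_map]
  apply List.map_congr_left
  intro k hk
  simp only [List.mem_range] at hk
  have hk' : a + (k : Int) < b := by omega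
  have hx0 : 0 ≤ a + (k : Int) := by positivity
  have hxn : a + (k : Int) < n := by omega
  have he : m * n + a + (k : Int) = a + (k : Int) + m * n := by ring
  simp only [Function.comp]
  rw [he]
  have hdiv : PySem.Int.floordiv (a + (k : Int) + m * n) n = m := by
    rw [PySem.Int.floordiv_eq_ediv_of_pos hn, Int.add_mul_ediv_right _ _ (ne_of_gt hn),
      Int.ediv_eq_zero_of_lt hx0 hxn, zero_add]
  have hmod : PySem.Int.mod (a + (k : Int) + m * n) n = a + (k : Int) := by
    rw [PySem.Int.mod_eq_emod_of_pos hn, Int.add_mul_emod_self_right, Int.emod_eq_of_lt hx0 hxn]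
  rw [hdiv, hmod]
  simp only [max_def]
  split_ifs <;> omega

-- filter (a ≤ i) over a range
lemma pv_filter_ge (a : Int) (lo hi : Int) :
    (PySem.List.pyRange lo hi 1).filter (fun i => decide (a ≤ i))
      = PySem.List.pyRange (max lo a) hi 1 := by
  have key : ∀ (fuel : Nat) (lo : Int), (hi - lo).toNat ≤ fuel →
      (PySem.List.pyRange lo hi 1).filter (fun i => decide (a ≤ i))
        = PySem.List.pyRange (max lo a) hi 1 := by
    intro fuel
    induction fuel with
    | zero =>
      intro lo hf
      rw [PySem.List.pyRange_one_eq_nil (by omega), PySem.List.pyRange_one_eq_nil (by omega)]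
      simp
    | succ f ih =>
      intro lo hf
      by_cases hlt : lo < hi
      · rw [PySem.List.pyRange_one_cons hlt]
        by_cases hal : a ≤ lo
        · rw [List.filter_cons_of_pos (by simpa using hal), ih (lo + 1) (by omega)]
          rw [show max lo a = lo by omega, show max (lo + 1) a = lo + 1 by omega,
            PySem.List.pyRange_one_cons hlt]
        · rw [List.filter_cons_of_neg (by simpa using hal), ih (lo + 1) (by omega)]
          congr 1
          omega
      · rw [PySem.List.pyRange_one_eq_nil (by omega), PySem.List.pyRange_one_eq_nil (by omega)]
        simp
  exact key ((hi - lo).toNat) lo le_rfl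

-- filter (i ≤ b) over a range
lemma pv_filter_le (b : Int) (lo hi : Int) :
    (PySem.List.pyRange lo hi 1).filter (fun i => decide (i ≤ b))
      = PySem.List.pyRange lo (min hi (b + 1)) 1 := by
  have key : ∀ (fuel : Nat) (lo : Int), (hi - lo).toNat ≤ fuel →
      (PySem.List.pyRange lo hi 1).filter (fun i => decide (i ≤ b))
        = PySem.List.pyRange lo (min hi (b + 1)) 1 := by
    intro fuel
    induction fuel with
    | zero =>
      intro lo hf
      rw [PySem.List.pyRange_one_eq_nil (by omega),
        PySem.List.pyRange_one_eq_nil (le_trans (min_le_left _ _) (by omega))]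
      simp
    | succ f ih =>
      intro lo hf
      by_cases hlt : lo < hi
      · rw [PySem.List.pyRange_one_cons hlt]
        by_cases hlb : lo ≤ b
        · rw [List.filter_cons_of_pos (by simpa using hlb), ih (lo + 1) (by omega)]
          exact (PySem.List.pyRange_one_cons (lt_min hlt (by omega))).symm
        · rw [List.filter_cons_of_neg (by simpa using hlb), ih (lo + 1) (by omega),
            PySem.List.pyRange_one_eq_nil (le_trans (min_le_right _ _) (by omega)),
            PySem.List.pyRange_one_eq_nil (le_trans (min_le_right _ _) (by omega))]
      · rw [PySem.List.pyRange_one_eq_nil (by omega),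
          PySem.List.pyRange_one_eq_nil (le_trans (min_le_left _ _) (by omega))]
        simp
  exact key ((hi - lo).toNat) lo le_rfl

-- filter (a ≤ i and i ≤ b) over a range
lemma pv_filter_between (a b : Int) (lo hi : Int) :
    (PySem.List.pyRange lo hi 1).filter (fun i => decide (a ≤ i) && decide (i ≤ b))
      = PySem.List.pyRange (max lo a) (min hi (b + 1)) 1 := by
  have h : (PySem.List.pyRange lo hi 1).filter (fun i => decide (a ≤ i) && decide (i ≤ b))
      = ((PySem.List.pyRange lo hi 1).filter (fun i => decide (a ≤ i))).filter
          (fun i => decide (i ≤ b)) := by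
    rw [List.filter_filter]
    apply List.filter_congr
    intro x _
    simp [Bool.and_comm]
  rw [h, pv_filter_ge, pv_filter_le]

-- B's flat pass over full rows j0..j1-1 is A's nested middle comprehension
lemma pv_mid (n : Int) (hn : 0 < n) (j0 j1 : Int) :
    (PySem.List.pyRange (j0 * n) (j1 * n) 1).map
        (fun i => max (PySem.Int.floordiv i n) (PySem.Int.mod i n) + 1)
      = (PySem.List.pyRange j0 j1 1).flatMap
          (fun j => (PySem.List.pyRange 0 n 1).map (fun i => if i ≤ j then j + 1 else i + 1)) := by
  have key : ∀ (fuel : Nat) (j0 : Int), (j1 - j0).toNat ≤ fuel →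
      (PySem.List.pyRange (j0 * n) (j1 * n) 1).map
          (fun i => max (PySem.Int.floordiv i n) (PySem.Int.mod i n) + 1)
        = (PySem.List.pyRange j0 j1 1).flatMap
            (fun j => (PySem.List.pyRange 0 n 1).map (fun i => if i ≤ j then j + 1 else i + 1)) := by
    intro fuel
    induction fuel with
    | zero =>
      intro j0 hf
      have hj : j1 ≤ j0 := by omega
      rw [PySem.List.pyRange_one_eq_nil (by nlinarith), PySem.List.pyRange_one_eq_nil hj]
      simp
    | succ f ih =>
      intro j0 hf
      by_cases hlt : j0 < j1
      · have h1 : j0 * n ≤ (j0 + 1) * n := by nlinarith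
        have h2 : (j0 + 1) * n ≤ j1 * n := by nlinarith
        rw [PySem.List.pyRange_one_append (j0 * n) ((j0 + 1) * n) (j1 * n) h1 h2,
          List.map_append, PySem.List.pyRange_one_cons hlt, List.flatMap_cons,
          ih (j0 + 1) (by omega)]
        congr 1
        have h := pv_row n j0 0 n hn le_rfl le_rfl
        simp only [add_zero] at h
        rw [show (j0 + 1) * n = j0 * n + n by ring]
        exact h
      · have hj : j1 ≤ j0 := by omega
        rw [PySem.List.pyRange_one_eq_nil (show j1 * n ≤ j0 * n by nlinarith),
          PySem.List.pyRange_one_eq_nil hj]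
        simp
  exact key ((j1 - j0).toNat) j0 le_rfl

-- ===== VERDICT (by name: the statement is the Claim_ definition above) =====
theorem solution_spec : Claim_equal_solution := by
  intro n left right _ hpre
  unfold Spec_solution
  obtain ⟨hnz, hor, himp⟩ := hpre
  rcases lt_or_gt_of_ne hnz with hneg | hn
  · -- n < 0: Pre_ forces right < left, and both sides are []
    have hrl : right < left := by
      rcases hor with h | h
      · omega
      · exact h
    simp only [solution, solution_alt,
      PySem.List.pyRange_one_eq_nil (show n ≤ (0 : Int) by omega),
      PySem.List.pyRange_one_eq_nil (show right + 1 ≤ left by omega)]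
    split_ifs <;> simp
  · unfold solution solution_alt
    set m1 := PySem.Int.floordiv left n with hm1
    set n1 := PySem.Int.mod left n with hn1d
    set m2 := PySem.Int.floordiv right n with hm2
    set n2 := PySem.Int.mod right n with hn2d
    have hL : m1 * n + n1 = left := PySem.Int.floordiv_mul_add_mod left n
    have hR : m2 * n + n2 = right := PySem.Int.floordiv_mul_add_mod right n
    have hn1b : 0 ≤ n1 := PySem.Int.mod_nonneg left hn
    have hn1c : n1 < n := PySem.Int.mod_lt left hn
    have hn2b : 0 ≤ n2 := PySem.Int.mod_nonneg right hn
    have hn2c : n2 < n := PySem.Int.mod_lt right hn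
    by_cases hmm : m1 ≠ m2
    · -- three-segment case: split B's flat range at the two row boundaries
      have hlr : left ≤ right := by
        rcases himp (by omega) with h | h
        · exact h
        · exact absurd h hmm
      have hle : m1 ≤ m2 := by
        rw [hm1, hm2, PySem.Int.floordiv_eq_ediv_of_pos hn, PySem.Int.floordiv_eq_ediv_of_pos hn]
        exact Int.ediv_le_ediv hn hlr
      have hlt : m1 < m2 := lt_of_le_of_ne hle hmm
      simp only [if_pos hmm]
      rw [pv_filter_ge, pv_filter_le,
        show max 0 n1 = n1 by omega, show min n (n2 + 1) = n2 + 1 by omega]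
      have s1 : left ≤ (m1 + 1) * n := by nlinarith
      have s2 : (m1 + 1) * n ≤ m2 * n := by nlinarith
      have s3 : m2 * n ≤ right + 1 := by nlinarith
      rw [PySem.List.pyRange_one_append left ((m1 + 1) * n) (right + 1) s1 (le_trans s2 s3),
        PySem.List.pyRange_one_append ((m1 + 1) * n) (m2 * n) (right + 1) s2 s3,
        List.map_append, List.map_append, ← List.append_assoc]
      have p1 : (PySem.List.pyRange left ((m1 + 1) * n) 1).map
          (fun i => max (PySem.Int.floordiv i n) (PySem.Int.mod i n) + 1)
          = (PySem.List.pyRange n1 n 1).map (fun i => if i ≤ m1 then m1 + 1 else i + 1) := by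
        rw [← hL, show (m1 + 1) * n = m1 * n + n by ring]
        exact pv_row n m1 n1 n hn hn1b le_rfl
      have p2 := pv_mid n hn (m1 + 1) m2
      have p3 : (PySem.List.pyRange (m2 * n) (right + 1) 1).map
          (fun i => max (PySem.Int.floordiv i n) (PySem.Int.mod i n) + 1)
          = (PySem.List.pyRange 0 (n2 + 1) 1).map (fun i => if i ≤ m2 then m2 + 1 else i + 1) := by
        rw [show right + 1 = m2 * n + (n2 + 1) by linarith [hR]]
        have h := pv_row n m2 0 (n2 + 1) hn le_rfl (by omega)
        simp only [add_zero] at h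
        exact h
      rw [p1, p2, p3]
    · rw [Ne, not_not] at hmm
      simp only [hmm]
      rw [if_neg (show ¬ (m2 ≠ m2) by simp)]
      rw [pv_filter_between, show max 0 n1 = n1 by omega, show min n (n2 + 1) = n2 + 1 by omega]
      rw [show left = m2 * n + n1 by rw [← hmm]; linarith [hL],
          show right + 1 = m2 * n + (n2 + 1) by linarith [hR]]
      exact (pv_row n m2 n1 (n2 + 1) hn hn1b (by omega)).symm
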